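-- pv_equiv track=rewrite | github.com/ANuKI-RT/CPP-Readability | cpp-readability-prediction/readability_for_c/code_processing/analyzer.py | workaround_get_comments_ranges
-- ===== SOURCE A (Python) =====
-- from typing import List
--
-- def workaround_get_comments_ranges(code: str, multiline_only: bool) -> List[List[int]]:
--     # State list:
--     # 0: Normal code
--     # 1: "/" found
--     # 2: "/*" found( in comment)
--     # 3: "*" found(maybe exit)
--     start_comment = 0
--     state = 0
--     ignores = []
--
--     for i in range(len(code)):
--         current = code[i]
--         if 0 == state:
--             if current == '/':
--                 state = 1
--         elif 1 == state:
--             if current == '*':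
--                 state = 2
--                 start_comment = i - 1
--             elif not multiline_only and current == '/':
--                 state = 4
--                 start_comment = i - 1
--             else:
--                 state = 0
--         elif 2 == state:
--             if current == '*':
--                 state = 3
--         elif 3 == state:
--             if current == '/':
--                 ignores.append([start_comment, i])
--                 state = 0
--             elif current != '*':
--                 state = 2
--         elif 4 == state:
--             if current == '\n':
--                 ignores.append([start_comment, i])
--                 state = 0
--
--     return ignores
-- ===== SOURCE B (Python) =====
-- from typing import List
--
-- def workaround_get_comments_ranges(code: str, multiline_only: bool) -> List[List[int]]:
--     ignores = []
--     i = 0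
--     n = len(code)
--     while True:
--         i = code.find('/', i)
--         if i == -1 or i + 1 >= n:
--             break
--         nxt = code[i + 1]
--         if nxt == '*':
--             j = code.find('*/', i + 2)
--             if j == -1:
--                 break
--             ignores.append([i, j + 1])
--             i = j + 2
--         elif nxt == '/' and not multiline_only:
--             j = code.find('\n', i + 2)
--             if j == -1:
--                 break
--             ignores.append([i, j])
--             i = j + 1
--         else:
--             i += 2
--     return ignores
-- ===== Notes on version B (the rewrite author's own statement) =====
-- stated objective: faster
-- what changed: Replaced the five-state per-character state machine by an index-driven while loop that jumps with str.find to the next '/', the closing '*/' or the ending newline, so comment bodies and plain code are skipped by C-level substring search instead of per-character Python bytecode.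
import Mathlib
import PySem

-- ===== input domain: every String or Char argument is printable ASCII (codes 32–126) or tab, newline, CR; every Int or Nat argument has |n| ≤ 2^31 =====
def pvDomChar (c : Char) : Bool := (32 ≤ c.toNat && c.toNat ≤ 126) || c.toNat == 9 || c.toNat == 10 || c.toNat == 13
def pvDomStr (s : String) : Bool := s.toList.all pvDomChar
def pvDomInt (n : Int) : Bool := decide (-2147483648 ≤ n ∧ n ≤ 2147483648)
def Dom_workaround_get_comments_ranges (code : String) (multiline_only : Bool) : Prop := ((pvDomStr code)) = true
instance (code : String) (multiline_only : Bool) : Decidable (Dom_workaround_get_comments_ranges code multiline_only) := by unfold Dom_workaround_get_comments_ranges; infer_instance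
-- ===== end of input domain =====

-- B replaces A's five-state per-character state machine by an index-driven loop that
-- jumps with substring search (str.find) to the next '/', the closing '*/' or the ending
-- newline (objective: faster by a constant factor, measured).


-- ===== PORT A =====
-- A's for-loop over code[i]: a state machine with states 0..4; i is the running index,
-- state/start/acc are the loop variables state/start_comment/ignores.
def runA (mo : Bool) : List Char → Nat → Int → Int → List (List Int) → List (List Int)
  | [], _, _, _, acc => acc
  | c :: rest, i, state, start, acc =>
    if state = 0 then
      if c = '/' then runA mo rest (i+1) 1 start acc
      else runA mo rest (i+1) 0 start acc
    else if state = 1 then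
      if c = '*' then runA mo rest (i+1) 2 ((i : Int) - 1) acc
      else if mo = false ∧ c = '/' then runA mo rest (i+1) 4 ((i : Int) - 1) acc
      else runA mo rest (i+1) 0 start acc
    else if state = 2 then
      if c = '*' then runA mo rest (i+1) 3 start acc
      else runA mo rest (i+1) 2 start acc
    else if state = 3 then
      if c = '/' then runA mo rest (i+1) 0 start (acc ++ [[start, (i : Int)]])
      else if c ≠ '*' then runA mo rest (i+1) 2 start acc
      else runA mo rest (i+1) 3 start acc
    else if state = 4 then
      if c = '\n' then runA mo rest (i+1) 0 start (acc ++ [[start, (i : Int)]])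
      else runA mo rest (i+1) 4 start acc
    else runA mo rest (i+1) state start acc

def workaround_get_comments_ranges (code : String) (multiline_only : Bool) : List (List Int) :=
  runA multiline_only code.toList 0 0 0 []

-- ===== PORT B =====
-- str.find(pat, i) ported by hand: first index of pat in the suffix (exact for the
-- nonempty patterns B uses; none = -1). B's absolute index i = offset of `rest` in code.
def findSub (pat : List Char) : List Char → Option Nat
  | [] => none
  | c :: r => if pat.isPrefixOf (c :: r) then some 0 else (findSub pat r).map (· + 1)

def bLoop (mo : Bool) : (rest : List Char) → Nat → List (List Int) → List (List Int)
  | rest, i, acc =>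
    match findSub ['/'] rest with
    | none => acc                                   -- i == -1: break
    | some k =>
      match h2 : rest.drop (k+1) with
      | [] => acc                                   -- '/' is the last char: break
      | c :: r2 =>
        if c = '*' then
          match findSub ['*','/'] r2 with
          | none => acc                             -- unterminated /* … : break
          | some m =>
              bLoop mo (r2.drop (m+2)) (i+k+2+m+2)
                (acc ++ [[((i+k : Nat) : Int), ((i+k+2+m+1 : Nat) : Int)]])
        else if c = '/' ∧ mo = false then
          match findSub ['\n'] r2 with
          | none => acc                             -- no newline after // : break
          | some m =>
              bLoop mo (r2.drop (m+1)) (i+k+2+m+1)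
                (acc ++ [[((i+k : Nat) : Int), ((i+k+2+m : Nat) : Int)]])
        else bLoop mo r2 (i+k+2) acc                -- not a comment start: i += 2
  termination_by rest _ _ => rest.length
  decreasing_by
    all_goals
      have hl : (rest.drop (k+1)).length = rest.length - (k+1) := List.length_drop ..
      rw [h2] at hl
      simp only [List.length_cons, List.length_drop] at *
      omega

def workaround_get_comments_ranges_alt (code : String) (multiline_only : Bool) : List (List Int) :=
  bLoop multiline_only code.toList 0 []

-- ===== PRECONDITION & SPEC =====
def Spec_workaround_get_comments_ranges (code : String) (multiline_only : Bool) (out : List (List Int)) : Prop := out = workaround_get_comments_ranges_alt code multiline_only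
instance (code : String) (multiline_only : Bool) (out : List (List Int)) : Decidable (Spec_workaround_get_comments_ranges code multiline_only out) := by unfold Spec_workaround_get_comments_ranges; infer_instance

-- ===== CLAIM (what is proved, stated in full; the proofs are below) =====
def Claim_equal_workaround_get_comments_ranges : Prop := ∀ (code : String) (multiline_only : Bool), Dom_workaround_get_comments_ranges code multiline_only → Spec_workaround_get_comments_ranges code multiline_only (workaround_get_comments_ranges code multiline_only)

-- ===== LEMMAS AND PROOFS =====

theorem runA_congr (mo : Bool) (st : Int) {l1 l2 : List Char} {i1 i2 : Nat} {s1 s2 : Int}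
    {a1 a2 : List (List Int)} (hl : l1 = l2) (hi : i1 = i2) (hs : s1 = s2) (ha : a1 = a2) :
    runA mo l1 i1 st s1 a1 = runA mo l2 i2 st s2 a2 := by
  subst hl hi hs ha; rfl

theorem bLoop_congr (mo : Bool) {l1 l2 : List Char} {i1 i2 : Nat}
    {a1 a2 : List (List Int)} (hl : l1 = l2) (hi : i1 = i2) (ha : a1 = a2) :
    bLoop mo l1 i1 a1 = bLoop mo l2 i2 a2 := by
  subst hl hi ha; rfl

theorem append_pair_congr {acc : List (List Int)} {s t : Int} {x y : Nat}
    (hs : s = t) (h : (x : Int) = (y : Int)) :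
    acc ++ [[s, (x : Int)]] = acc ++ [[t, (y : Int)]] := by
  rw [hs, h]

theorem isPrefixOf_single_false {a c : Char} (h : c ≠ a) {r : List Char} :
    ([a].isPrefixOf (c :: r)) = false := by
  simp [List.isPrefixOf]; exact fun h' => h h'.symm

theorem isPrefixOf_pair_false_left {a b c : Char} (h : c ≠ a) {r : List Char} :
    ([a, b].isPrefixOf (c :: r)) = false := by
  cases r with
  | nil => simp [List.isPrefixOf]
  | cons d r' => simp [List.isPrefixOf]; exact fun h' => absurd h'.symm h

theorem isPrefixOf_pair_false_right {a b c : Char} (h : c ≠ b) {x : Char} {r : List Char} :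
    ([a, b].isPrefixOf (x :: c :: r)) = false := by
  simp [List.isPrefixOf]; exact fun _ h' => h h'.symm

-- Non-dependent unfolding of bLoop (the definition's inner match carries the
-- equation only for its termination proof).
theorem bLoop_eq (mo : Bool) (rest : List Char) (i : Nat) (acc : List (List Int)) :
    bLoop mo rest i acc =
      match findSub ['/'] rest with
      | none => acc
      | some k =>
        match rest.drop (k+1) with
        | [] => acc
        | c :: r2 =>
          if c = '*' then
            match findSub ['*','/'] r2 with
            | none => acc
            | some m =>
                bLoop mo (r2.drop (m+2)) (i+k+2+m+2)
                  (acc ++ [[((i+k : Nat) : Int), ((i+k+2+m+1 : Nat) : Int)]])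
          else if c = '/' ∧ mo = false then
            match findSub ['\n'] r2 with
            | none => acc
            | some m =>
                bLoop mo (r2.drop (m+1)) (i+k+2+m+1)
                  (acc ++ [[((i+k : Nat) : Int), ((i+k+2+m : Nat) : Int)]])
          else bLoop mo r2 (i+k+2) acc := by
  rw [bLoop]
  cases hf : findSub ['/'] rest with
  | none => rfl
  | some k =>
    simp only []
    cases hd : rest.drop (k+1) with
    | nil => rfl
    | cons c r2 => rfl

-- State 0 scans to the next '/' (entering state 1 just past it).
theorem runA_state0 (mo : Bool) (cs : List Char) : ∀ (i : Nat) (start : Int) (acc : List (List Int)),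
    runA mo cs i 0 start acc =
      match findSub ['/'] cs with
      | none => acc
      | some k => runA mo (cs.drop (k+1)) (i+k+1) 1 start acc := by
  induction cs with
  | nil => intro i start acc; simp [runA, findSub]
  | cons c r ih =>
    intro i start acc
    by_cases hc : c = '/'
    · subst hc; simp [runA, findSub, List.isPrefixOf]
    · have h0 : runA mo (c :: r) i 0 start acc = runA mo r (i+1) 0 start acc := by
        simp [runA, hc]
      rw [h0, ih (i+1) start acc]
      simp only [findSub, isPrefixOf_single_false hc, Bool.false_eq_true, if_false]
      cases hf : findSub ['/'] r with
      | none => simp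
      | some k =>
        simp only [Option.map_some]
        exact runA_congr mo 1 (by simp [List.drop_succ_cons]) (by omega) rfl rfl

-- States 2/3 (inside /* …) scan to the first "*/"; state 3 means a '*' was just read.
theorem runA_state23 (mo : Bool) (cs : List Char) :
    (∀ (i : Nat) (start : Int) (acc : List (List Int)),
      runA mo cs i 2 start acc =
        match findSub ['*','/'] cs with
        | none => acc
        | some m => runA mo (cs.drop (m+2)) (i+m+2) 0 start (acc ++ [[start, ((i+m+1 : Nat) : Int)]]))
    ∧ (∀ (i : Nat) (start : Int) (acc : List (List Int)),
      runA mo cs i 3 start acc =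
        match findSub ['*','/'] ('*' :: cs) with
        | none => acc
        | some m => runA mo (('*' :: cs).drop (m+2)) (i+m+1) 0 start (acc ++ [[start, ((i+m : Nat) : Int)]])) := by
  induction cs with
  | nil =>
    constructor
    · intro i start acc; simp [runA, findSub]
    · intro i start acc; simp [runA, findSub, List.isPrefixOf]
  | cons c r ih =>
    obtain ⟨ih2, ih3⟩ := ih
    constructor
    · -- state 2 on c :: r
      intro i start acc
      by_cases hc : c = '*'
      · subst hc
        have h2 : runA mo ('*' :: r) i 2 start acc = runA mo r (i+1) 3 start acc := by
          simp [runA]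
        rw [h2, ih3 (i+1) start acc]
        cases hf : findSub ['*','/'] ('*' :: r) with
        | none => simp
        | some m =>
          simp only []
          exact runA_congr mo 0 rfl (by omega) rfl (append_pair_congr rfl (by omega))
      · have h2 : runA mo (c :: r) i 2 start acc = runA mo r (i+1) 2 start acc := by
          simp [runA, hc]
        rw [h2, ih2 (i+1) start acc]
        simp only [findSub, isPrefixOf_pair_false_left hc, Bool.false_eq_true, if_false]
        cases hf : findSub ['*','/'] r with
        | none => simp
        | some m =>
          simp only [Option.map_some]
          exact runA_congr mo 0 (by simp [List.drop_succ_cons]) (by omega) rfl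
            (append_pair_congr rfl (by omega))
    · -- state 3 on c :: r
      intro i start acc
      by_cases hc : c = '/'
      · subst hc
        have h3 : runA mo ('/' :: r) i 3 start acc
            = runA mo r (i+1) 0 start (acc ++ [[start, (i : Int)]]) := by
          simp [runA]
        rw [h3]
        have hp : findSub ['*','/'] ('*' :: '/' :: r) = some 0 := by
          simp [findSub, List.isPrefixOf]
        simp only [hp]
        exact runA_congr mo 0 (by simp) (by omega) rfl (by norm_num)
      · by_cases hs : c = '*'
        · subst hs
          have h3 : runA mo ('*' :: r) i 3 start acc = runA mo r (i+1) 3 start acc := by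
            simp [runA]
          rw [h3, ih3 (i+1) start acc]
          have hstep : findSub ['*','/'] ('*' :: '*' :: r)
              = (findSub ['*','/'] ('*' :: r)).map (· + 1) := by
            simp [findSub, isPrefixOf_pair_false_right (show ('*' : Char) ≠ '/' by decide)]
          rw [hstep]
          cases hf : findSub ['*','/'] ('*' :: r) with
          | none => simp
          | some m =>
            simp only [Option.map_some]
            exact runA_congr mo 0 (by simp [List.drop_succ_cons]) (by omega) rfl
              (append_pair_congr rfl (by omega))
        · have h3 : runA mo (c :: r) i 3 start acc = runA mo r (i+1) 2 start acc := by
            simp [runA, hc, hs]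
          rw [h3, ih2 (i+1) start acc]
          have hstep : findSub ['*','/'] ('*' :: c :: r)
              = ((findSub ['*','/'] r).map (· + 1)).map (· + 1) := by
            simp [findSub, isPrefixOf_pair_false_right (show c ≠ '/' from hc),
              isPrefixOf_pair_false_left (show c ≠ '*' from hs)]
          rw [hstep]
          cases hf : findSub ['*','/'] r with
          | none => simp
          | some m =>
            simp only [Option.map_some]
            exact runA_congr mo 0 (by simp [List.drop_succ_cons]) (by omega) rfl
              (append_pair_congr rfl (by omega))

-- State 4 (inside // …) scans to the first newline.
theorem runA_state4 (mo : Bool) (cs : List Char) : ∀ (i : Nat) (start : Int) (acc : List (List Int)),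
    runA mo cs i 4 start acc =
      match findSub ['\n'] cs with
      | none => acc
      | some m => runA mo (cs.drop (m+1)) (i+m+1) 0 start (acc ++ [[start, ((i+m : Nat) : Int)]]) := by
  induction cs with
  | nil => intro i start acc; simp [runA, findSub]
  | cons c r ih =>
    intro i start acc
    by_cases hc : c = '\n'
    · subst hc
      have h4 : runA mo ('\n' :: r) i 4 start acc
          = runA mo r (i+1) 0 start (acc ++ [[start, (i : Int)]]) := by
        simp [runA]
      rw [h4]
      simp [findSub, List.isPrefixOf]
    · have h4 : runA mo (c :: r) i 4 start acc = runA mo r (i+1) 4 start acc := by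
        simp [runA, hc]
      rw [h4, ih (i+1) start acc]
      simp only [findSub, isPrefixOf_single_false hc, Bool.false_eq_true, if_false]
      cases hf : findSub ['\n'] r with
      | none => simp
      | some m =>
        simp only [Option.map_some]
        exact runA_congr mo 0 (by simp [List.drop_succ_cons]) (by omega) rfl
          (append_pair_congr rfl (by omega))

theorem findSub_le (pat : List Char) (cs : List Char) (k : Nat)
    (h : findSub pat cs = some k) : k < cs.length := by
  induction cs generalizing k with
  | nil => simp [findSub] at h
  | cons c r ih =>
    simp only [findSub] at h
    split at h
    · cases h; simp
    · cases hf : findSub pat r with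
      | none => rw [hf] at h; simp at h
      | some k' =>
        rw [hf] at h; simp at h
        have := ih k' hf
        simp; omega

-- Main invariant: A's machine started in state 0 equals B's jump loop.
theorem runA_eq_bLoop (mo : Bool) : ∀ (n : Nat) (cs : List Char), cs.length ≤ n →
    ∀ (i : Nat) (start : Int) (acc : List (List Int)),
    runA mo cs i 0 start acc = bLoop mo cs i acc := by
  intro n
  induction n with
  | zero =>
    intro cs hn i start acc
    have : cs = [] := by cases cs <;> simp_all
    subst this
    simp [runA, bLoop_eq, findSub]
  | succ n ih =>
    intro cs hn i start acc
    rw [runA_state0, bLoop_eq]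
    cases h1 : findSub ['/'] cs with
    | none => simp
    | some k =>
      simp only []
      have hk := findSub_le _ _ _ h1
      cases h2 : cs.drop (k+1) with
      | nil => simp [runA]
      | cons c r2 =>
        simp only []
        have hlen : r2.length + (k+2) ≤ cs.length := by
          have hl : (cs.drop (k+1)).length = cs.length - (k+1) := List.length_drop ..
          rw [h2] at hl; simp at hl; omega
        by_cases hc : c = '*'
        · subst hc
          have h1' : runA mo ('*' :: r2) (i+k+1) 1 start acc
              = runA mo r2 (i+k+2) 2 (((i+k+1 : Nat) : Int) - 1) acc := by
            have he : (i+k+1) + 1 = i+k+2 := by omega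
            simp [runA, he]
          rw [h1', (runA_state23 mo r2).1]
          rw [if_pos rfl]
          cases hf : findSub ['*','/'] r2 with
          | none => simp
          | some m =>
            simp only []
            have hm := findSub_le _ _ _ hf
            rw [ih (r2.drop (m+2)) (by simp; omega)]
            exact bLoop_congr mo rfl (by omega)
              (append_pair_congr (by push_cast; omega) (by omega))
        · by_cases hcc : c = '/' ∧ mo = false
          · obtain ⟨hc2, hmo⟩ := hcc
            subst hc2
            have h1' : runA mo ('/' :: r2) (i+k+1) 1 start acc
                = runA mo r2 (i+k+2) 4 (((i+k+1 : Nat) : Int) - 1) acc := by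
              have he : (i+k+1) + 1 = i+k+2 := by omega
              simp [runA, he, hmo]
            rw [h1', runA_state4]
            rw [if_neg hc, if_pos ⟨rfl, hmo⟩]
            cases hf : findSub ['\n'] r2 with
            | none => simp
            | some m =>
              simp only []
              have hm := findSub_le _ _ _ hf
              rw [ih (r2.drop (m+1)) (by simp; omega)]
              exact bLoop_congr mo rfl (by omega)
                (append_pair_congr (by push_cast; omega) (by omega))
          · have h1' : runA mo (c :: r2) (i+k+1) 1 start acc
                = runA mo r2 (i+k+2) 0 start acc := by
              have he : (i+k+1) + 1 = i+k+2 := by omega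
              by_cases hsl : c = '/'
              · subst hsl
                have hmo : mo = true := by
                  cases mo
                  · exact absurd ⟨rfl, rfl⟩ hcc
                  · rfl
                subst hmo
                simp [runA, he]
              · simp [runA, hc, hsl, he]
            rw [h1', ih r2 (by omega)]
            rw [if_neg hc, if_neg hcc]

-- ===== VERDICT (by name: the statement is the Claim_ definition above) =====
theorem workaround_get_comments_ranges_spec : Claim_equal_workaround_get_comments_ranges := by
  intro code mo _
  unfold Spec_workaround_get_comments_ranges workaround_get_comments_ranges workaround_get_comments_ranges_alt
  exact runA_eq_bLoop mo code.toList.length code.toList le_rfl 0 0 []
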